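-- pv_equiv track=rewrite | github.com/dstl-lab/dsc10-tutor-jlab | dsc10_tutor_jlab_backend/practice_problems/crawler.py | _normalize_code_block_text
-- ===== SOURCE A (Python) =====
-- from typing import Dict, List, Optional, Tuple
--
-- def _normalize_code_block_text(text: str) -> str:
--     """Normalize whitespace inside code blocks while preserving indentation."""
--     normalized = text.replace("\r\n", "\n").replace("\r", "\n")
--     lines = [line.rstrip() for line in normalized.split("\n")]
--
--     while lines and not lines[0].strip():
--         lines.pop(0)
--     while lines and not lines[-1].strip():
--         lines.pop()
--
--     cleaned_lines: List[str] = []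
--     prev_blank = False
--     for line in lines:
--         is_blank = not line.strip()
--         if is_blank and prev_blank:
--             continue
--         cleaned_lines.append(line)
--         prev_blank = is_blank
--
--     return "\n".join(cleaned_lines).strip()
-- ===== SOURCE B (Python) =====
-- from itertools import groupby
--
-- def _normalize_code_block_text(text: str) -> str:
--     """Normalize whitespace inside code blocks while preserving indentation."""
--     normalized = text.replace("\r\n", "\n").replace("\r", "\n")
--     lines = [line.rstrip() for line in normalized.split("\n")]
--     result = []
--     for blank, group in groupby(lines, key=lambda l: not l.strip()):
--         if blank:
--             result.append("")
--         else:
--             result.extend(group)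
--     return "\n".join(result).strip()
-- ===== Notes on version B (the rewrite author's own statement) =====
-- stated objective: simpler
-- what changed: A's two leading/trailing blank-line pop-loops and the stateful prev_blank collapse loop are replaced by a single itertools.groupby pass that emits a single blank line per blank run, with the final strip absorbing the leading/trailing blank runs.
import Mathlib
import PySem

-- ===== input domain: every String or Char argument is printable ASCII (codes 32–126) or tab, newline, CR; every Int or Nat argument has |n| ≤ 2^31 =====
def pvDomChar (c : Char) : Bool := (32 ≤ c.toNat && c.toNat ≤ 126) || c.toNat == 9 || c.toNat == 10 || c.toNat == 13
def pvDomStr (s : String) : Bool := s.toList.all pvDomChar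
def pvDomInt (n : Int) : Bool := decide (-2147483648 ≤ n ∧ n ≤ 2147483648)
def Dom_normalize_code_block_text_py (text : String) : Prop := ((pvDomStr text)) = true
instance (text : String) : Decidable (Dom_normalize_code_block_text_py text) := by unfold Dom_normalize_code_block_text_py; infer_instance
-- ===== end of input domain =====

-- B replaces A's two trimming pop-loops and the stateful prev_blank collapse loop by a single
-- groupby pass over the lines (one blank line per blank run), relying on the final strip; objective: simpler.

-- `not line.strip()` — the blank-line test both Pythons use
def pvBlank (l : List Char) : Bool := PySem.Chars.strip l == []

-- ===== PORT A =====
def normalize_code_block_text_py (text : String) : String :=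
  let normalized := PySem.Chars.replace (PySem.Chars.replace text.toList ['\r', '\n'] ['\n']) ['\r'] ['\n']
  let lines := (PySem.Chars.splitOn normalized ['\n']).map PySem.Chars.rstrip
  -- while lines and not lines[0].strip(): lines.pop(0)
  let lines1 := lines.dropWhile pvBlank
  -- while lines and not lines[-1].strip(): lines.pop()
  let lines2 := (lines1.reverse.dropWhile pvBlank).reverse
  -- for line in lines: … with state (cleaned_lines, prev_blank)
  let cleaned := (lines2.foldl
      (fun (st : List (List Char) × Bool) line =>
        let is_blank := pvBlank line
        if is_blank && st.2 then st else (st.1 ++ [line], is_blank))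
      ([], false)).1
  String.ofList (PySem.Chars.strip (PySem.Chars.join ['\n'] cleaned))

-- ===== PORT B =====
-- itertools.groupby(lines, key=pvBlank), groups materialised (hand port, exact for this use)
def pvGroupRuns : List (List Char) → List (Bool × List (List Char))
  | [] => []
  | x :: xs =>
    (pvBlank x, x :: xs.takeWhile (fun y => pvBlank y == pvBlank x)) ::
      pvGroupRuns (xs.dropWhile (fun y => pvBlank y == pvBlank x))
termination_by xs => xs.length
decreasing_by
  have := List.length_dropWhile_le (fun y => pvBlank y == pvBlank x) xs
  simp; omega

def normalize_code_block_text_py_alt (text : String) : String :=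
  let normalized := PySem.Chars.replace (PySem.Chars.replace text.toList ['\r', '\n'] ['\n']) ['\r'] ['\n']
  let lines := (PySem.Chars.splitOn normalized ['\n']).map PySem.Chars.rstrip
  -- for blank, group in groupby(lines, …): append '' / extend group
  let result := (pvGroupRuns lines).foldl
      (fun acc g => if g.1 then acc ++ [([] : List Char)] else acc ++ g.2) []
  String.ofList (PySem.Chars.strip (PySem.Chars.join ['\n'] result))

-- ===== PRECONDITION & SPEC =====
def Spec_normalize_code_block_text_py (text : String) (out : String) : Prop := out = normalize_code_block_text_py_alt text
instance (text : String) (out : String) : Decidable (Spec_normalize_code_block_text_py text out) := by unfold Spec_normalize_code_block_text_py; infer_instance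

-- ===== CLAIM (what is proved, stated in full; the proofs are below) =====
def Claim_equal_normalize_code_block_text_py : Prop := ∀ (text : String), Dom_normalize_code_block_text_py text → Spec_normalize_code_block_text_py text (normalize_code_block_text_py text)

-- ===== LEMMAS AND PROOFS =====

-- canonical collapse of consecutive blank lines (A's loop, state threaded)
def pvCollapse : Bool → List (List Char) → List (List Char)
  | _, [] => []
  | prev, l :: ls => if pvBlank l && prev then pvCollapse prev ls else l :: pvCollapse (pvBlank l) ls

-- prev_blank after processing p
def pvEnd (b : Bool) (p : List (List Char)) : Bool := (p.getLast?.map pvBlank).getD b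

theorem pvEnd_cons (b : Bool) (l : List Char) (ls : List (List Char)) :
    pvEnd b (l :: ls) = pvEnd (pvBlank l) ls := by
  cases ls with
  | nil => rfl
  | cons x xs =>
    obtain ⟨y, hy⟩ := Option.isSome_iff_exists.mp (List.getLast?_isSome.mpr (List.cons_ne_nil x xs))
    simp [pvEnd, List.getLast?_cons_cons, hy]

theorem pv_foldl_eq (xs : List (List Char)) : ∀ acc prev,
    xs.foldl (fun (st : List (List Char) × Bool) line =>
        let is_blank := pvBlank line
        if is_blank && st.2 then st else (st.1 ++ [line], is_blank)) (acc, prev)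
      = (acc ++ pvCollapse prev xs, pvEnd prev xs) := by
  induction xs with
  | nil => simp [pvCollapse, pvEnd]
  | cons l ls ih =>
    intro acc prev
    simp only [List.foldl_cons]
    by_cases h : (pvBlank l && prev) = true
    · have h1 : pvBlank l = true := by revert h; cases pvBlank l <;> simp
      have h2 : prev = true := by revert h; cases prev <;> simp
      subst h2
      simp only [h1, Bool.true_and, if_pos]
      rw [ih, pvCollapse, pvEnd_cons, h1]
      simp
    · rw [if_neg (by simpa using h)]
      rw [ih, pvCollapse, pvEnd_cons]
      rw [if_neg (by simpa using h)]
      simp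

theorem pvCollapse_append (p q : List (List Char)) : ∀ (b : Bool),
    pvCollapse b (p ++ q) = pvCollapse b p ++ pvCollapse (pvEnd b p) q := by
  induction p with
  | nil => simp [pvCollapse, pvEnd]
  | cons l ls ih =>
    intro b
    by_cases h : (pvBlank l && b) = true
    · have h1 : pvBlank l = true := by revert h; cases pvBlank l <;> simp
      have h2 : b = true := by revert h; cases b <;> simp
      subst h2
      rw [List.cons_append, pvCollapse, pvCollapse, if_pos h, if_pos h, ih, pvEnd_cons, h1]
    · rw [List.cons_append, pvCollapse, pvCollapse, if_neg (by simpa using h), if_neg (by simpa using h),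
        ih, pvEnd_cons, List.cons_append]

theorem pvCollapse_true_allblank (p : List (List Char)) (h : ∀ l ∈ p, pvBlank l = true) :
    pvCollapse true p = [] := by
  induction p with
  | nil => rfl
  | cons l ls ih => simp [pvCollapse, h l (by simp), ih (fun x hx => h x (by simp [hx]))]

theorem pvCollapse_allnonblank (p : List (List Char)) (h : ∀ l ∈ p, pvBlank l = false) : ∀ (b : Bool),
    pvCollapse b p = p := by
  induction p with
  | nil => intro b; rfl
  | cons l ls ih =>
    intro b
    simp [pvCollapse, h l (by simp), ih (fun x hx => h x (by simp [hx]))]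

theorem pvCollapse_false_allnil (p : List (List Char)) (hne : p ≠ []) (h : ∀ l ∈ p, l = []) :
    pvCollapse false p = [[]] := by
  cases p with
  | nil => exact absurd rfl hne
  | cons l ls =>
    have hl : l = [] := h l (by simp)
    subst hl
    simp [pvCollapse, show pvBlank [] = true from by decide]
    exact pvCollapse_true_allblank ls (fun x hx => by
      have := h x (by simp [hx]); subst this; decide)

theorem pvCollapse_true_eq_false (p : List (List Char))
    (h : p = [] ∨ ∃ x t, p = x :: t ∧ pvBlank x = false) :
    pvCollapse true p = pvCollapse false p := by
  rcases h with h | ⟨x, t, rfl, hx⟩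
  · subst h; rfl
  · simp [pvCollapse, hx]

theorem pvEnd_allnonblank (p : List (List Char)) (h : ∀ l ∈ p, pvBlank l = false) :
    pvEnd false p = false := by
  cases hp : p.getLast? with
  | none => simp [pvEnd, hp]
  | some y => simp [pvEnd, hp, h y (List.mem_of_getLast? hp)]

theorem pvEnd_true_allblank (p : List (List Char)) (h : ∀ l ∈ p, pvBlank l = true) :
    pvEnd true p = true := by
  cases hp : p.getLast? with
  | none => simp [pvEnd, hp]
  | some y => simp [pvEnd, hp, h y (List.mem_of_getLast? hp)]

theorem pvEnd_allblank_ne (p : List (List Char)) (b : Bool) (hne : p ≠ [])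
    (h : ∀ l ∈ p, pvBlank l = true) : pvEnd b p = true := by
  obtain ⟨y, hy⟩ := Option.isSome_iff_exists.mp (List.getLast?_isSome.mpr hne)
  simp [pvEnd, hy, h y (List.mem_of_getLast? hy)]

-- head of a dropWhile run fails the predicate
theorem pv_head_dropWhile {α : Type} (p : α → Bool) (l : List α) (z : α) (t : List α)
    (h : l.dropWhile p = z :: t) : p z = false := by
  have hne : l.dropWhile p ≠ [] := by simp [h]
  have hhd := List.head_dropWhile_not p hne
  revert hhd
  generalize hq : l.dropWhile p = q at hne h
  subst h
  simp

theorem pvEmit_groupRuns (xs : List (List Char)) (hb : ∀ l ∈ xs, pvBlank l = true → l = []) :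
    (pvGroupRuns xs).flatMap (fun g => if g.1 then [([] : List Char)] else g.2) = pvCollapse false xs := by
  fun_induction pvGroupRuns xs with
  | case1 => rfl
  | case2 x xs ih =>
    set tk := xs.takeWhile (fun y => pvBlank y == pvBlank x) with htkdef
    set dp := xs.dropWhile (fun y => pvBlank y == pvBlank x) with hdpdef
    have hdrop : ∀ l ∈ dp, pvBlank l = true → l = [] := by
      intro l hl
      exact hb l (by simp [(List.dropWhile_sublist _).mem hl])
    have htk : ∀ l ∈ tk, pvBlank l = pvBlank x := by
      intro l hl
      simpa using List.mem_takeWhile_imp hl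
    have hxs : xs = tk ++ dp := (List.takeWhile_append_dropWhile ..).symm
    simp only [List.flatMap_cons, ih hdrop]
    by_cases hx : pvBlank x = true
    · have hxnil : x = [] := hb x (by simp) hx
      have hdphead : dp = [] ∨ ∃ z t, dp = z :: t ∧ pvBlank z = false := by
        cases hdp : dp with
        | nil => exact Or.inl rfl
        | cons z t =>
          refine Or.inr ⟨z, t, rfl, ?_⟩
          have hz := pv_head_dropWhile _ _ _ _ (hdpdef.symm.trans hdp)
          simpa [hx] using hz
      rw [if_pos hx]
      have hrhs : pvCollapse false (x :: xs) = [] :: pvCollapse false dp := by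
        calc pvCollapse false (x :: xs) = x :: pvCollapse true xs := by simp [pvCollapse, hx]
          _ = x :: (pvCollapse true tk ++ pvCollapse (pvEnd true tk) dp) := by
              rw [hxs, pvCollapse_append]
          _ = [] :: pvCollapse false dp := by
              rw [pvCollapse_true_allblank tk (fun l hl => (htk l hl).trans hx),
                pvEnd_true_allblank tk (fun l hl => (htk l hl).trans hx),
                pvCollapse_true_eq_false dp hdphead, hxnil]
              simp
      rw [hrhs]; rfl
    · have hx' : pvBlank x = false := by simpa using hx
      rw [if_neg hx]
      have hrhs : pvCollapse false (x :: xs) = x :: (tk ++ pvCollapse false dp) := by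
        calc pvCollapse false (x :: xs) = x :: pvCollapse false xs := by simp [pvCollapse, hx']
          _ = x :: (pvCollapse false tk ++ pvCollapse (pvEnd false tk) dp) := by
              rw [hxs, pvCollapse_append]
          _ = x :: (tk ++ pvCollapse false dp) := by
              rw [pvCollapse_allnonblank tk (fun l hl => (htk l hl).trans hx') false,
                pvEnd_allnonblank tk (fun l hl => (htk l hl).trans hx')]
      rw [hrhs]; simp

-- blankness facts
theorem pv_ws_of_strip_nil (y : List Char) (h : PySem.Chars.strip y = []) :
    ∀ c ∈ y, PySem.Chars.isspace c = true := by
  intro c hc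
  have h1 : (y.dropWhile PySem.Chars.isspace).reverse.dropWhile PySem.Chars.isspace = [] := by
    simpa [PySem.Chars.strip, PySem.Chars.lstrip, PySem.Chars.rstrip] using h
  have h2 : ∀ c ∈ y.dropWhile PySem.Chars.isspace, PySem.Chars.isspace c = true := by
    intro d hd
    exact List.dropWhile_eq_nil_iff.mp h1 d (by simpa using hd)
  rcases List.mem_append.mp (by rw [List.takeWhile_append_dropWhile (p := PySem.Chars.isspace)]; exact hc) with h3 | h3
  · exact List.mem_takeWhile_imp h3
  · exact h2 c h3

theorem pv_rstrip_nil_of_blank (y : List Char) (h : pvBlank (PySem.Chars.rstrip y) = true) :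
    PySem.Chars.rstrip y = [] := by
  have hws : ∀ c ∈ PySem.Chars.rstrip y, PySem.Chars.isspace c = true :=
    pv_ws_of_strip_nil _ (by simpa [pvBlank] using h)
  by_contra hne
  have hne' : y.reverse.dropWhile PySem.Chars.isspace ≠ [] := by
    simp only [PySem.Chars.rstrip] at hne
    intro hx; exact hne (by simp [hx])
  have hhd := List.head_dropWhile_not PySem.Chars.isspace hne'
  have hmem : (y.reverse.dropWhile PySem.Chars.isspace).head hne' ∈ PySem.Chars.rstrip y := by
    simp only [PySem.Chars.rstrip, List.mem_reverse]
    exact List.head_mem hne'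
  rw [hws _ hmem] at hhd
  simp at hhd

-- join/strip absorption
theorem pv_strip_cons_nl (cs : List Char) : PySem.Chars.strip ('\n' :: cs) = PySem.Chars.strip cs := by
  simp [PySem.Chars.strip, PySem.Chars.lstrip, show PySem.Chars.isspace '\n' = true from by decide]

theorem pv_rstrip_append_nl (cs : List Char) : PySem.Chars.rstrip (cs ++ ['\n']) = PySem.Chars.rstrip cs := by
  simp [PySem.Chars.rstrip, show PySem.Chars.isspace '\n' = true from by decide]

theorem pv_strip_append_nl (cs : List Char) : PySem.Chars.strip (cs ++ ['\n']) = PySem.Chars.strip cs := by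
  simp only [PySem.Chars.strip, PySem.Chars.lstrip, List.dropWhile_append]
  by_cases h : (cs.dropWhile PySem.Chars.isspace).isEmpty = true
  · simp [show List.dropWhile PySem.Chars.isspace ['\n'] = [] from by decide,
      show PySem.Chars.rstrip [] = [] from rfl, List.isEmpty_iff.mp h]
  · simp only [if_neg h]
    exact pv_rstrip_append_nl _

theorem pv_join_append_nil (Z : List (List Char)) (h : Z ≠ []) :
    PySem.Chars.join ['\n'] (Z ++ [[]]) = PySem.Chars.join ['\n'] Z ++ ['\n'] := by
  induction Z with
  | nil => exact absurd rfl h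
  | cons a Z ih =>
    cases Z with
    | nil =>
      rw [List.cons_append, List.nil_append, PySem.Chars.join_cons_cons, PySem.Chars.join_singleton,
        PySem.Chars.join_singleton]
      simp
    | cons b Z =>
      have ih' := ih (by simp)
      simp only [List.cons_append] at ih' ⊢
      rw [PySem.Chars.join_cons_cons, ih', PySem.Chars.join_cons_cons]
      simp

theorem pv_stripjoin_cons_nil (Z : List (List Char)) :
    PySem.Chars.strip (PySem.Chars.join ['\n'] ([] :: Z)) = PySem.Chars.strip (PySem.Chars.join ['\n'] Z) := by
  cases Z with
  | nil => rw [PySem.Chars.join_singleton, PySem.Chars.join_nil]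
  | cons b Z =>
    rw [PySem.Chars.join_cons_cons, List.nil_append]
    exact pv_strip_cons_nl _

theorem pv_stripjoin_append_nil (Z : List (List Char)) :
    PySem.Chars.strip (PySem.Chars.join ['\n'] (Z ++ [[]])) = PySem.Chars.strip (PySem.Chars.join ['\n'] Z) := by
  cases Z with
  | nil => rw [List.nil_append, PySem.Chars.join_singleton, PySem.Chars.join_nil]
  | cons b Z =>
    rw [pv_join_append_nil _ (by simp)]
    exact pv_strip_append_nl _

-- dropping the leading blank run does not change strip∘join∘collapse
theorem pv_trim_front (L : List (List Char)) (hb : ∀ l ∈ L, pvBlank l = true → l = []) :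
    PySem.Chars.strip (PySem.Chars.join ['\n'] (pvCollapse false L))
      = PySem.Chars.strip (PySem.Chars.join ['\n'] (pvCollapse false (L.dropWhile pvBlank))) := by
  set tf := L.takeWhile pvBlank with htfdef
  set F := L.dropWhile pvBlank with hFdef
  have hL : L = tf ++ F := (List.takeWhile_append_dropWhile ..).symm
  cases htf : tf with
  | nil =>
    have : L = F := by rw [hL, htf, List.nil_append]
    rw [← this]
  | cons t0 ts =>
    have htfblank : ∀ l ∈ tf, pvBlank l = true := fun l hl => List.mem_takeWhile_imp hl
    have htfnil : ∀ l ∈ tf, l = [] := fun l hl =>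
      hb l ((List.takeWhile_sublist _).mem hl) (htfblank l hl)
    have hFhead : F = [] ∨ ∃ z t, F = z :: t ∧ pvBlank z = false := by
      cases hF : F with
      | nil => exact Or.inl rfl
      | cons z t => exact Or.inr ⟨z, t, rfl, pv_head_dropWhile _ _ _ _ (hFdef.symm.trans hF)⟩
    have : pvCollapse false L = [] :: pvCollapse false F := by
      rw [hL, pvCollapse_append,
        pvCollapse_false_allnil tf (by rw [htf]; simp) htfnil,
        pvEnd_allblank_ne tf false (by rw [htf]; simp) htfblank,
        pvCollapse_true_eq_false F hFhead]
      rfl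
    rw [this, pv_stripjoin_cons_nil]

-- dropping the trailing blank run does not change strip∘join∘collapse
theorem pv_trim_back (F : List (List Char)) (hb : ∀ l ∈ F, pvBlank l = true → l = []) :
    PySem.Chars.strip (PySem.Chars.join ['\n'] (pvCollapse false F))
      = PySem.Chars.strip (PySem.Chars.join ['\n'] (pvCollapse false ((F.reverse.dropWhile pvBlank).reverse))) := by
  set T := (F.reverse.dropWhile pvBlank).reverse with hTdef
  set sf := (F.reverse.takeWhile pvBlank).reverse with hsfdef
  have hF : F = T ++ sf := by
    conv_lhs => rw [← List.reverse_reverse F,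
      ← List.takeWhile_append_dropWhile (p := pvBlank) (l := F.reverse)]
    rw [List.reverse_append]
  have hsfblank : ∀ l ∈ sf, pvBlank l = true := by
    intro l hl
    exact List.mem_takeWhile_imp (List.mem_reverse.mp hl)
  have hsfnil : ∀ l ∈ sf, l = [] := by
    intro l hl
    exact hb l (by rw [hF]; exact List.mem_append.mpr (Or.inr hl)) (hsfblank l hl)
  cases hsf : sf with
  | nil =>
    have : F = T := by rw [hF, hsf, List.append_nil]
    rw [this]
  | cons s0 ss =>
    rw [hF, pvCollapse_append]
    cases hb' : pvEnd false T with
    | true =>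
      rw [pvCollapse_true_allblank sf hsfblank, List.append_nil]
    | false =>
      rw [pvCollapse_false_allnil sf (by rw [hsf]; simp) hsfnil, pv_stripjoin_append_nil]

theorem pv_main (L : List (List Char)) (hb : ∀ l ∈ L, pvBlank l = true → l = []) :
    PySem.Chars.strip (PySem.Chars.join ['\n']
      (pvCollapse false (((L.dropWhile pvBlank).reverse.dropWhile pvBlank).reverse)))
  = PySem.Chars.strip (PySem.Chars.join ['\n'] (pvCollapse false L)) := by
  have hbF : ∀ l ∈ L.dropWhile pvBlank, pvBlank l = true → l = [] := by
    intro l hl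
    exact hb l ((List.dropWhile_sublist _).mem hl)
  rw [pv_trim_front L hb, pv_trim_back (L.dropWhile pvBlank) hbF]

-- ===== VERDICT (by name: the statement is the Claim_ definition above) =====
theorem normalize_code_block_text_py_spec : Claim_equal_normalize_code_block_text_py := by
  intro text _
  unfold Spec_normalize_code_block_text_py
  unfold normalize_code_block_text_py normalize_code_block_text_py_alt
  simp only []
  set L := (PySem.Chars.splitOn
      (PySem.Chars.replace (PySem.Chars.replace text.toList ['\r', '\n'] ['\n']) ['\r'] ['\n'])
      ['\n']).map PySem.Chars.rstrip with hLdef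
  have hb : ∀ l ∈ L, pvBlank l = true → l = [] := by
    intro l hl hblank
    obtain ⟨y, _, rfl⟩ := List.mem_map.mp hl
    exact pv_rstrip_nil_of_blank y hblank
  have hfold := pv_foldl_eq (((L.dropWhile pvBlank).reverse.dropWhile pvBlank).reverse) [] false
  have hB : (pvGroupRuns L).foldl
      (fun acc g => if g.1 then acc ++ [([] : List Char)] else acc ++ g.2) []
      = pvCollapse false L := by
    have hfn : (fun (acc : List (List Char)) (g : Bool × List (List Char)) =>
        if g.1 then acc ++ [([] : List Char)] else acc ++ g.2)
        = fun acc g => acc ++ (if g.1 then [([] : List Char)] else g.2) := by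
      funext acc g
      by_cases hg : g.1 = true <;> simp [hg]
    rw [hfn, PySem.List.foldl_append_eq_flatMap, List.nil_append]
    exact pvEmit_groupRuns L hb
  rw [hfold, hB]
  simp only [List.nil_append]
  rw [pv_main L hb]
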